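-- pv_equiv track=rewrite | github.com/hectwilliams/AlgorithmBook | chapter13/python/chapter13.py | union_unsorted_arrays
-- ===== SOURCE A (Python) =====
-- def union_unsorted_arrays(a,b) :
--   result = []
--   count = None
--
--   for i in range(0, len(a)) :
--     result.append(a[i])
--
--   for i in range(0, len(b)) :
--     count = 0
--
--     for k in range(0, len(b)):
--       count += +(b[i] == b[k])
--
--     for j in range (0, len(result)) :
--       count -= +(b[i] == result[j])
--
--     if count > 0:
--       result.append(b[i])
--
--   return result
-- ===== SOURCE B (Python) =====
-- def union_unsorted_arrays(a, b):
--     # count tables for a and b; cap each value at max(count in a, count in b)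
--     ca = {}
--     for x in a:
--         ca[x] = ca.get(x, 0) + 1
--     cb = {}
--     for x in b:
--         cb[x] = cb.get(x, 0) + 1
--     # one capped pass over a followed by b
--     emitted = {}
--     result = []
--     for x in a + b:
--         e = emitted.get(x, 0)
--         if e < max(ca.get(x, 0), cb.get(x, 0)):
--             result.append(x)
--             emitted[x] = e + 1
--     return result
-- ===== Notes on version B (the rewrite author's own statement) =====
-- stated objective: faster
-- what changed: Replaced A's copy-a loop plus per-b-element rescans of b and of the growing result (cubic) by two precomputed count tables and a single capped-filter pass over the concatenation a+b maintaining an 'emitted' dict.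
import Mathlib
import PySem

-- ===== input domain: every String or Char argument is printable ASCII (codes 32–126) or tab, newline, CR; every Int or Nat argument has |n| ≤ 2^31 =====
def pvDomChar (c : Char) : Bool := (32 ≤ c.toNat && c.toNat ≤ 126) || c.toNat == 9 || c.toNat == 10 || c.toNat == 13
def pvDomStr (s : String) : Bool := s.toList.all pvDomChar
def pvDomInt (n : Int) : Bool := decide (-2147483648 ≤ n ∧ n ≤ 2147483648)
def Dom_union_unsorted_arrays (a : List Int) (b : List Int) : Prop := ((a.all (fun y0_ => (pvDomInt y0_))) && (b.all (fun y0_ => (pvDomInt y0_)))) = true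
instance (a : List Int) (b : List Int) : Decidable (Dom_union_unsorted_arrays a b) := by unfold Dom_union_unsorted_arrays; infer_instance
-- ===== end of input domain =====

-- B replaces A's copy-a loop and per-element rescans of b and the growing result by two count
-- tables and one capped-filter pass over a ++ b (objective: faster, asymptotically).

-- ===== PORT A =====
def union_unsorted_arrays (a : List Int) (b : List Int) : List Int :=
  let result := a.foldl (fun r x => r ++ [x]) ([] : List Int)
  b.foldl (fun result bi =>
    let count : Int := b.foldl (fun c bk => c + (if bi == bk then 1 else 0)) 0
    let count : Int := result.foldl (fun c rj => c - (if bi == rj then 1 else 0)) count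
    if count > 0 then result ++ [bi] else result) result

-- ===== PORT B =====
def union_unsorted_arrays_alt (a : List Int) (b : List Int) : List Int :=
  let ca := a.foldl (fun d x => d.insert x (d.getD x 0 + 1)) (PySem.Dict.empty : PySem.Dict Int Int)
  let cb := b.foldl (fun d x => d.insert x (d.getD x 0 + 1)) (PySem.Dict.empty : PySem.Dict Int Int)
  let st := (a ++ b).foldl (fun (st : PySem.Dict Int Int × List Int) x =>
      let e := st.1.getD x 0
      if e < max (ca.getD x 0) (cb.getD x 0) then (st.1.insert x (e + 1), st.2 ++ [x])
      else st) (PySem.Dict.empty, ([] : List Int))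
  st.2

-- ===== PRECONDITION & SPEC =====
def Spec_union_unsorted_arrays (a : List Int) (b : List Int) (out : List Int) : Prop := out = union_unsorted_arrays_alt a b
instance (a : List Int) (b : List Int) (out : List Int) : Decidable (Spec_union_unsorted_arrays a b out) := by unfold Spec_union_unsorted_arrays; infer_instance

-- ===== CLAIM (what is proved, stated in full; the proofs are below) =====
def Claim_equal_union_unsorted_arrays : Prop := ∀ (a : List Int) (b : List Int), Dom_union_unsorted_arrays a b → Spec_union_unsorted_arrays a b (union_unsorted_arrays a b)

-- ===== LEMMAS AND PROOFS =====

-- B's capped-filter step, with the cap abstracted as a function (used only in the proofs)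
def bstep (cap : Int → Int) (st : PySem.Dict Int Int × List Int) (x : Int) : PySem.Dict Int Int × List Int :=
  let e := st.1.getD x 0
  if e < cap x then (st.1.insert x (e + 1), st.2 ++ [x]) else st

-- A's step over b, with the recounting folds replaced by their values (used only in the proofs)
def astep (b : List Int) (r : List Int) (x : Int) : List Int :=
  if (0 : Int) + (b.count x : Int) - (r.count x : Int) > 0 then r ++ [x] else r

lemma foldl_app_singleton : ∀ (l r : List Int), l.foldl (fun r x => r ++ [x]) r = r ++ l := by
  intro l
  induction l with
  | nil => simp
  | cons y l ih => intro r; simp [List.foldl_cons, ih]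

lemma foldl_count_add (v : Int) : ∀ (l : List Int) (c : Int),
    l.foldl (fun c y => c + (if v == y then 1 else 0)) c = c + (l.count v : Int) := by
  intro l
  induction l with
  | nil => simp
  | cons y l ih =>
    intro c
    simp only [List.foldl_cons, ih, List.count_cons]
    by_cases h : v = y
    · subst h; simp; ring
    · simp [h, Ne.symm h]

lemma foldl_count_sub (v : Int) : ∀ (l : List Int) (c : Int),
    l.foldl (fun c y => c - (if v == y then 1 else 0)) c = c - (l.count v : Int) := by
  intro l
  induction l with
  | nil => simp
  | cons y l ih =>
    intro c
    simp only [List.foldl_cons, ih, List.count_cons]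
    by_cases h : v = y
    · subst h; simp; ring
    · simp [h, Ne.symm h]

-- Phase over a: while every element still fits under the cap, the capped filter appends everything.
lemma foldA (cap : Int → Int) : ∀ (l : List Int) (d : PySem.Dict Int Int) (r : List Int),
    (∀ x, d.getD x 0 = (r.count x : Int)) →
    (∀ x, ((r ++ l).count x : Int) ≤ cap x) →
    (l.foldl (bstep cap) (d, r)).2 = r ++ l ∧
      (∀ x, (l.foldl (bstep cap) (d, r)).1.getD x 0 = ((r ++ l).count x : Int)) := by
  intro l
  induction l with
  | nil => intro d r hd _; simpa using hd
  | cons y l ih =>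
    intro d r hd hcap
    have hy : d.getD y 0 < cap y := by
      have := hcap y
      simp [List.count_append, List.count_cons, hd y] at *
      omega
    have hstep : bstep cap (d, r) y = (d.insert y (d.getD y 0 + 1), r ++ [y]) := by
      simp [bstep, hy]
    have hd' : ∀ x, (d.insert y (d.getD y 0 + 1)).getD x 0 = (((r ++ [y]).count x : Nat) : Int) := by
      intro x
      rw [PySem.Dict.getD_insert]
      by_cases hxy : x = y
      · subst hxy; simp [hd, List.count_append]
      · simp [hxy, Ne.symm hxy, hd, List.count_append]
    have hcap' : ∀ x, ((((r ++ [y]) ++ l).count x : Nat) : Int) ≤ cap x := by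
      intro x
      have := hcap x
      simpa [List.count_append, List.count_cons] using this
    have := ih (d.insert y (d.getD y 0 + 1)) (r ++ [y]) hd' hcap'
    simpa [List.foldl_cons, hstep, List.append_assoc] using this

-- Phase over b: once the result already holds all of a, the capped filter agrees with A's deficit test.
lemma foldB (a b : List Int) : ∀ (l : List Int) (d : PySem.Dict Int Int) (r : List Int),
    (∀ x, d.getD x 0 = (r.count x : Int)) →
    (∀ x, (a.count x : Int) ≤ (r.count x : Int)) →
    (l.foldl (bstep (fun x => max ((a.count x : Nat) : Int) ((b.count x : Nat) : Int))) (d, r)).2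
      = l.foldl (astep b) r := by
  intro l
  induction l with
  | nil => intro d r _ _; rfl
  | cons y l ih =>
    intro d r hd ha
    have hcond : (d.getD y 0 < max ((a.count y : Nat) : Int) ((b.count y : Nat) : Int))
        ↔ ((0 : Int) + (b.count y : Int) - (r.count y : Int) > 0) := by
      rw [hd y]
      have := ha y
      omega
    by_cases h : (0 : Int) + (b.count y : Int) - (r.count y : Int) > 0
    · have hy : d.getD y 0 < max ((a.count y : Nat) : Int) ((b.count y : Nat) : Int) := hcond.mpr h
      have hd' : ∀ x, (d.insert y (d.getD y 0 + 1)).getD x 0 = (((r ++ [y]).count x : Nat) : Int) := by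
        intro x
        rw [PySem.Dict.getD_insert]
        by_cases hxy : x = y
        · subst hxy; simp [hd, List.count_append]
        · simp [hxy, Ne.symm hxy, hd, List.count_append]
      have ha' : ∀ x, ((a.count x : Nat) : Int) ≤ (((r ++ [y]).count x : Nat) : Int) := by
        intro x
        have := ha x
        simp [List.count_append, List.count_cons]
        omega
      have h' : r.count y < b.count y := by omega
      have := ih (d.insert y (d.getD y 0 + 1)) (r ++ [y]) hd' ha'
      simpa [List.foldl_cons, bstep, hy, astep, h, h'] using this
    · have hy : ¬ d.getD y 0 < max ((a.count y : Nat) : Int) ((b.count y : Nat) : Int) := by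
        rw [hcond]; exact h
      have h' : ¬ r.count y < b.count y := by omega
      have := ih d r hd ha
      simpa [List.foldl_cons, bstep, hy, astep, h, h'] using this

-- A's port equals the abstract astep fold over b starting from a
lemma portA_eq (a b : List Int) : union_unsorted_arrays a b = b.foldl (astep b) a := by
  unfold union_unsorted_arrays
  rw [foldl_app_singleton]
  simp only [List.nil_append]
  congr 1
  funext r x
  rw [foldl_count_add, foldl_count_sub]
  rfl

-- counting fold = List.count
lemma counterD (l : List Int) (x : Int) :
    (l.foldl (fun d x => d.insert x (d.getD x 0 + 1)) (PySem.Dict.empty : PySem.Dict Int Int)).getD x 0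
      = (l.count x : Int) := by
  rw [PySem.Dict.getD_foldl_insert_add_one]; simp

-- B's port equals the abstract capped fold
lemma portB_eq (a b : List Int) :
    union_unsorted_arrays_alt a b
      = ((a ++ b).foldl (bstep (fun x => max ((a.count x : Nat) : Int) ((b.count x : Nat) : Int)))
          (PySem.Dict.empty, [])).2 := by
  simp only [union_unsorted_arrays_alt]
  congr 2
  funext st x
  simp only [bstep, counterD]

-- ===== VERDICT (by name: the statement is the Claim_ definition above) =====
theorem union_unsorted_arrays_spec : Claim_equal_union_unsorted_arrays := by
  intro a b _
  unfold Spec_union_unsorted_arrays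
  rw [portA_eq, portB_eq, List.foldl_append]
  obtain ⟨h2, h1⟩ := foldA (fun x => max ((a.count x : Nat) : Int) ((b.count x : Nat) : Int)) a
      PySem.Dict.empty [] (by intro x; simp) (by intro x; simp)
  simp only [List.nil_append] at h2 h1
  rw [show (a.foldl (bstep (fun x => max ((a.count x : Nat) : Int) ((b.count x : Nat) : Int)))
        (PySem.Dict.empty, ([] : List Int)))
      = ((a.foldl (bstep (fun x => max ((a.count x : Nat) : Int) ((b.count x : Nat) : Int)))
        (PySem.Dict.empty, ([] : List Int))).1, a) from Prod.ext rfl h2]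
  exact (foldB a b b _ a h1 (by intro x; simp)).symm
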